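-- pv_equiv track=rewrite | github.com/nexorin9/medical-trial-simulator | src/prompts/judge.py | _analyze_defense_strength
-- ===== SOURCE A (Python) =====
-- from typing import List, Dict, Any, Optional
--
-- def _analyze_defense_strength(defenses: List[Dict[str, Any]]) -> str:
--     """
--     分析辩护强度
--
--     Args:
--         defenses: 辩护列表
--
--     Returns:
--         强度等级：strong, medium, weak
--     """
--     if not defenses:
--         return "weak"
--
--     strong_count = sum(1 for d in defenses if d.get("strength") == "strong")
--     medium_count = sum(1 for d in defenses if d.get("strength") == "medium")
--
--     if strong_count >= 2:
--         return "strong"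
--     elif strong_count == 1 or medium_count >= 2:
--         return "medium"
--     else:
--         return "weak"
-- ===== SOURCE B (Python) =====
-- from typing import List, Dict, Any, Optional
--
-- def _analyze_defense_strength(defenses: List[Dict[str, Any]]) -> str:
--     # 4-state finite automaton over the list instead of counting + thresholds:
--     # states track only the evidence that still matters; returns "strong"
--     # early on the second strong defense.
--     state = "none"
--     for d in defenses:
--         t = d.get("strength")
--         if t == "strong":
--             if state == "one_strong":
--                 return "strong"
--             state = "one_strong"
--         elif t == "medium":
--             if state == "none":
--                 state = "one_medium"
--             elif state == "one_medium":
--                 state = "two_medium"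
--     if state == "one_strong" or state == "two_medium":
--         return "medium"
--     return "weak"
-- ===== Notes on version B (the rewrite author's own statement) =====
-- stated objective: alternative
-- what changed: Replaces counting both tags and comparing against thresholds by a 4-state finite automaton run over the list (states: none / one_medium / two_medium / one_strong), which returns 'strong' early on the second strong defense and reads the verdict off the final state; no counters or threshold tests remain.
import Mathlib
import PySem

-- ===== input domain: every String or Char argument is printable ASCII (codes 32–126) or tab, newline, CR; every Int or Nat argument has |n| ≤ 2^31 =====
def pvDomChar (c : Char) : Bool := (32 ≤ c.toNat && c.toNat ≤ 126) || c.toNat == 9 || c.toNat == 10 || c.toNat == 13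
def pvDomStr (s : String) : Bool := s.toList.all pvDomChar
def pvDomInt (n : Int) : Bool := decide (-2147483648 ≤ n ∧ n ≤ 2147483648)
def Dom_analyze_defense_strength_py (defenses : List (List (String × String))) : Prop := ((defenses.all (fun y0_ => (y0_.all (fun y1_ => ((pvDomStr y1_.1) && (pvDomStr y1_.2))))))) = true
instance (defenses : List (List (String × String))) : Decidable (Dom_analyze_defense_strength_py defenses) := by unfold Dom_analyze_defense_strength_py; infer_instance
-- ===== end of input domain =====

-- B replaces A's two counting scans + threshold tests by a 4-state finite automaton
-- run over the list with early exit on the second strong defense (alternative; same cost).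


-- ===== PORT A =====
-- sum(1 for d in defenses if d.get("strength") == v) as a fold, as in A
def analyze_defense_strength_py (defenses : List (List (String × String))) : String :=
  if defenses = [] then "weak"
  else
    let strong_count : Int := defenses.foldl
      (fun acc d => if (PySem.Dict.mk d).get? "strength" = some "strong" then acc + 1 else acc) 0
    let medium_count : Int := defenses.foldl
      (fun acc d => if (PySem.Dict.mk d).get? "strength" = some "medium" then acc + 1 else acc) 0
    if strong_count ≥ 2 then "strong"
    else if strong_count = 1 ∨ medium_count ≥ 2 then "medium"
    else "weak"

-- ===== PORT B =====
-- the automaton's four states (the loop's `state` variable in Source B)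
inductive DefSt | none_ | oneM | twoM | oneS
deriving DecidableEq, Repr

-- Source B's loop as structural recursion on the list; early `return "strong"`
def defDfaRun (xs : List (List (String × String))) (st : DefSt) : String :=
  match xs with
  | [] => if st = DefSt.oneS ∨ st = DefSt.twoM then "medium" else "weak"
  | d :: ds =>
    let t := (PySem.Dict.mk d).get? "strength"
    if t = some "strong" then
      if st = DefSt.oneS then "strong" else defDfaRun ds DefSt.oneS
    else if t = some "medium" then
      defDfaRun ds (match st with
        | DefSt.none_ => DefSt.oneM
        | DefSt.oneM => DefSt.twoM
        | s => s)
    else defDfaRun ds st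

def analyze_defense_strength_py_alt (defenses : List (List (String × String))) : String :=
  defDfaRun defenses DefSt.none_

-- ===== PRECONDITION & SPEC =====
def Spec_analyze_defense_strength_py (defenses : List (List (String × String))) (out : String) : Prop := out = analyze_defense_strength_py_alt defenses
instance (defenses : List (List (String × String))) (out : String) : Decidable (Spec_analyze_defense_strength_py defenses out) := by unfold Spec_analyze_defense_strength_py; infer_instance

-- ===== CLAIM (what is proved, stated in full; the proofs are below) =====
def Claim_equal_analyze_defense_strength_py : Prop := ∀ (defenses : List (List (String × String))), Dom_analyze_defense_strength_py defenses → Spec_analyze_defense_strength_py defenses (analyze_defense_strength_py defenses)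

-- ===== LEMMAS AND PROOFS =====

-- the verdict A computes from the two totals
def defVerdict (s m : Int) : String :=
  if 2 ≤ s then "strong" else if s = 1 ∨ 2 ≤ m then "medium" else "weak"

def defKey (d : List (String × String)) : Option String := (PySem.Dict.mk d).get? "strength"

def defCS (xs : List (List (String × String))) : Int := ((xs.map defKey).count (some "strong") : Int)
def defCM (xs : List (List (String × String))) : Int := ((xs.map defKey).count (some "medium") : Int)

theorem defVerdict_m_sat (s m m' : Int) (hm : 2 ≤ m) (hm' : 2 ≤ m') :
    defVerdict s m = defVerdict s m' := by
  unfold defVerdict; split_ifs with h1 h2 h3 <;> simp_all <;> omega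

theorem defVerdict_s_pos (s m m' : Int) (hs : 1 ≤ s) :
    defVerdict s m = defVerdict s m' := by
  unfold defVerdict; split_ifs with h1 h2 h3 <;> simp_all <;> omega

-- A's counting fold equals the count of the key values in the mapped list
theorem pv_foldl_count (v : Option String) :
    ∀ (xs : List (List (String × String))) (n : Int),
      xs.foldl (fun acc d => if defKey d = v then acc + 1 else acc) n
        = n + ((xs.map defKey).count v : Int) := by
  intro xs
  induction xs with
  | nil => intro n; simp
  | cons x xs ih =>
    intro n
    simp only [List.foldl_cons, List.map_cons, List.count_cons, ih]
    by_cases h : defKey x = v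
    · simp [h]; ring
    · simp [h, Ne.symm h]

theorem defCS_cons (x : List (String × String)) (xs : List (List (String × String))) :
    defCS (x :: xs) = defCS xs + (if defKey x = some "strong" then 1 else 0) := by
  unfold defCS; simp only [List.map_cons, List.count_cons, beq_iff_eq]
  split_ifs with h <;> push_cast <;> ring

theorem defCM_cons (x : List (String × String)) (xs : List (List (String × String))) :
    defCM (x :: xs) = defCM xs + (if defKey x = some "medium" then 1 else 0) := by
  unfold defCM; simp only [List.map_cons, List.count_cons, beq_iff_eq]
  split_ifs with h <;> push_cast <;> ring

theorem defCS_nonneg (xs : List (List (String × String))) : 0 ≤ defCS xs := by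
  unfold defCS; positivity

theorem defCM_nonneg (xs : List (List (String × String))) : 0 ≤ defCM xs := by
  unfold defCM; positivity

-- the automaton invariant: each state stands for pending counts already seen
theorem defDfaRun_verdict : ∀ (xs : List (List (String × String))),
    defDfaRun xs DefSt.none_ = defVerdict (defCS xs) (defCM xs)
  ∧ defDfaRun xs DefSt.oneM = defVerdict (defCS xs) (defCM xs + 1)
  ∧ defDfaRun xs DefSt.twoM = defVerdict (defCS xs) (defCM xs + 2)
  ∧ defDfaRun xs DefSt.oneS = defVerdict (defCS xs + 1) (defCM xs) := by
  intro xs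
  induction xs with
  | nil =>
    refine ⟨?_, ?_, ?_, ?_⟩ <;> simp [defDfaRun, defVerdict, defCS, defCM]
  | cons x xs ih =>
    obtain ⟨h0, h1, h2, h3⟩ := ih
    have hcs := defCS_cons x xs
    have hcm := defCM_cons x xs
    have hcsn := defCS_nonneg xs
    have hcmn := defCM_nonneg xs
    by_cases hs : defKey x = some "strong"
    · have hm : ¬ defKey x = some "medium" := by simp [hs]
      have hcs' : defCS (x :: xs) = defCS xs + 1 := by rw [hcs, if_pos hs]
      have hcm' : defCM (x :: xs) = defCM xs := by rw [hcm, if_neg hm]; ring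
      refine ⟨?_, ?_, ?_, ?_⟩
      · simp only [defDfaRun, defKey] at *
        simp [hs, h3, hcs', hcm']
      · simp only [defDfaRun, defKey] at *
        simp [hs, h3, hcs', hcm']
        refine defVerdict_s_pos _ _ _ ?_; omega
      · simp only [defDfaRun, defKey] at *
        simp [hs, h3, hcs', hcm']
        refine defVerdict_s_pos _ _ _ ?_; omega
      · simp only [defDfaRun, defKey] at *
        simp [hs, hcs', hcm']
        unfold defVerdict; rw [if_pos (by omega)]
    · by_cases hm : defKey x = some "medium"
      · have hcs' : defCS (x :: xs) = defCS xs := by rw [hcs, if_neg hs]; ring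
        have hcm' : defCM (x :: xs) = defCM xs + 1 := by rw [hcm, if_pos hm]
        refine ⟨?_, ?_, ?_, ?_⟩
        · simp only [defDfaRun, defKey] at *
          simp [hs, hm, h1, hcs', hcm']
        · simp only [defDfaRun, defKey] at *
          simp [hs, hm, h2, hcs', hcm']
          ring_nf
        · simp only [defDfaRun, defKey] at *
          simp [hs, hm, h2, hcs', hcm']
          refine defVerdict_m_sat _ _ _ ?_ ?_ <;> omega
        · simp only [defDfaRun, defKey] at *
          simp [hs, hm, h3, hcs', hcm']
          refine defVerdict_s_pos _ _ _ ?_; omega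
      · have hcs' : defCS (x :: xs) = defCS xs := by rw [hcs, if_neg hs]; ring
        have hcm' : defCM (x :: xs) = defCM xs := by rw [hcm, if_neg hm]; ring
        refine ⟨?_, ?_, ?_, ?_⟩
        · simp only [defDfaRun, defKey] at *
          simp [hs, hm, h0, hcs', hcm']
        · simp only [defDfaRun, defKey] at *
          simp [hs, hm, h1, hcs', hcm']
        · simp only [defDfaRun, defKey] at *
          simp [hs, hm, h2, hcs', hcm']
        · simp only [defDfaRun, defKey] at *
          simp [hs, hm, h3, hcs', hcm']

-- ===== VERDICT (by name: the statement is the Claim_ definition above) =====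
theorem analyze_defense_strength_py_spec : Claim_equal_analyze_defense_strength_py := by
  intro defenses _
  unfold Spec_analyze_defense_strength_py analyze_defense_strength_py analyze_defense_strength_py_alt
  rw [(defDfaRun_verdict defenses).1]
  rcases defenses with _ | ⟨d, ds⟩
  · simp [defVerdict, defCS, defCM]
  · simp only [if_neg (List.cons_ne_nil d ds)]
    rw [show (fun acc d => if (PySem.Dict.mk d).get? "strength" = some "strong" then acc + 1 else acc)
          = (fun (acc : Int) d => if defKey d = some "strong" then acc + 1 else acc) from rfl,
        show (fun acc d => if (PySem.Dict.mk d).get? "strength" = some "medium" then acc + 1 else acc)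
          = (fun (acc : Int) d => if defKey d = some "medium" then acc + 1 else acc) from rfl,
        pv_foldl_count, pv_foldl_count]
    unfold defVerdict defCS defCM
    norm_num
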